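-- pv_equiv track=rewrite | github.com/tsani/coding-cat-public | double-letter/solution.py | double_letter
-- ===== SOURCE A (Python) =====
-- def double_letter(word):
--     '''
--         Correct implementation
--     '''
--     consonants = "bcdfghjklpmntrqsvwxyzBCDFGHJKLMNPQRSTVWXYZ"  # List of consonants (both upper and lower case)
--     consonant_count = 0 # To count consonants found
--     result = list(word) # convert string to list for easier manipulation
--
--     for i in range(len(result)):
--         if result[i] in consonants:
--             consonant_count += 1
--             if consonant_count == 2: # When we find the second consonant
--                 result[i] = result[i] * 2 # Double the second consonant
--                 break # We can stop as we've made the necessary change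
--     return "".join(result) #join the list back into a string
-- ===== SOURCE B (Python) =====
-- def double_letter(word):
--     consonants = "bcdfghjklpmntrqsvwxyzBCDFGHJKLMNPQRSTVWXYZ"
--     positions = [i for i, c in enumerate(word) if c in consonants]
--     if len(positions) < 2:
--         return word
--     i = positions[1]
--     return word[:i] + word[i] * 2 + word[i + 1:]
-- ===== Notes on version B (the rewrite author's own statement) =====
-- stated objective: alternative
-- what changed: B replaces A's single counting loop with break and in-place list mutation by two staged passes: first collect every consonant position with an enumerate comprehension (no early exit), then if there are at least two, splice the doubled character in by slicing word[:i] + word[i]*2 + word[i+1:]; no list(word)/join pipeline.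
import Mathlib
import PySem

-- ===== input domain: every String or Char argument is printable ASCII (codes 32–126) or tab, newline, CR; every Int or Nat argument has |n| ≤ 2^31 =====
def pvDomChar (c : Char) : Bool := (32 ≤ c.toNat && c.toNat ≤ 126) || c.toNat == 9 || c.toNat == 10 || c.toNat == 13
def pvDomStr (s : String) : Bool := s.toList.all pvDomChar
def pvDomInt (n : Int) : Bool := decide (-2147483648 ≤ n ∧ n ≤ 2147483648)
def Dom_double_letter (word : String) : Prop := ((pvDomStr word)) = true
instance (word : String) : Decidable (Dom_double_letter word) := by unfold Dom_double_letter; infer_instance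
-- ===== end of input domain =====

-- One line: B replaces A's counting loop-with-break and list mutation by two staged passes —
-- collect all consonant positions with enumerate, then splice at positions[1] — same values everywhere.

def pvConsonants : List Char := "bcdfghjklpmntrqsvwxyzBCDFGHJKLMNPQRSTVWXYZ".toList

-- ===== PORT A =====
-- A's for-loop: the only mutation of `result` is immediately followed by `break`,
-- so the loop is the recursion below over the index i with `result` fixed.
def pvA_go (result : List (List Char)) (count : Nat) (i : Nat) : List (List Char) :=
  if h : i < result.length then
    if PySem.Chars.isIn result[i] pvConsonants then   -- result[i] in consonants
      if count + 1 = 2 then result.set i (result[i] ++ result[i])  -- result[i] * 2, then break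
      else pvA_go result (count + 1) (i + 1)
    else pvA_go result count (i + 1)
  else result
termination_by result.length - i

def double_letter (word : String) : String :=
  -- result = list(word); loop; "".join(result)
  String.ofList (PySem.Chars.join [] (pvA_go (word.toList.map (fun c => [c])) 0 0))

-- ===== PORT B =====
def double_letter_alt (word : String) : String :=
  -- positions = [i for i, c in enumerate(word) if c in consonants]
  let positions : List Int :=
    ((PySem.List.enumerate word.toList 0).filter
        (fun p => PySem.Chars.isIn [p.2] pvConsonants)).map Prod.fst
  match positions with
  | _ :: i :: _ =>      -- len(positions) >= 2; i = positions[1]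
    match PySem.Chars.pyGet? word.toList i with      -- word[i]; the index comes from enumerate, so in range
    | some c => String.ofList (PySem.Chars.slice word.toList none (some i) ++ [c, c] ++
                               PySem.Chars.slice word.toList (some (i + 1)) none)
    | none => word
  | _ => word           -- len(positions) < 2: return word

-- ===== PRECONDITION & SPEC =====
def Spec_double_letter (word : String) (out : String) : Prop := out = double_letter_alt word
instance (word : String) (out : String) : Decidable (Spec_double_letter word out) := by unfold Spec_double_letter; infer_instance

-- ===== CLAIM =====
def Claim_equal_double_letter : Prop := ∀ (word : String), Dom_double_letter word → Spec_double_letter word (double_letter word)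

-- ===== LEMMAS AND PROOFS =====

-- proof-side: the consonant pairs of the enumeration, and a first/second-consonant finder
def pvPosP (l : List Char) (s : Int) : List (Int × Char) :=
  (PySem.List.enumerate l s).filter (fun p => PySem.Chars.isIn [p.2] pvConsonants)

def pvFind (l : List Char) (s : Int) (seen : Bool) : Option (Int × Char) :=
  match l with
  | [] => none
  | c :: rest =>
    if PySem.Chars.isIn [c] pvConsonants then
      if seen then some (s, c) else pvFind rest (s + 1) true
    else pvFind rest (s + 1) seen

theorem pvPosP_cons (c : Char) (rest : List Char) (s : Int) :
    pvPosP (c :: rest) s =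
      if PySem.Chars.isIn [c] pvConsonants then (s, c) :: pvPosP rest (s + 1)
      else pvPosP rest (s + 1) := by
  by_cases h : PySem.Chars.isIn [c] pvConsonants <;>
    simp [pvPosP, PySem.List.enumerate_cons, h]

theorem pvFind_posP (l : List Char) (s : Int) (seen : Bool) :
    pvFind l s seen = (pvPosP l s)[cond seen 0 1]? := by
  induction l generalizing s seen with
  | nil => simp [pvFind, pvPosP, PySem.List.enumerate_nil]
  | cons c rest ih =>
    rw [pvPosP_cons]
    simp only [pvFind]
    split_ifs with h1 h2
    · subst h2; simp
    · have : seen = false := by simpa using h2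
      subst this
      simpa using ih (s + 1) true
    · exact ih (s + 1) seen

theorem pvFind_spec (l : List Char) (s : Int) (seen : Bool) (j : Int) (c : Char)
    (h : pvFind l s seen = some (j, c)) :
    ∃ k : Nat, k < l.length ∧ j = s + k ∧ l[k]? = some c := by
  induction l generalizing s seen with
  | nil => simp [pvFind] at h
  | cons x rest ih =>
    simp only [pvFind] at h
    split_ifs at h with h1 h2
    · obtain ⟨rfl, rfl⟩ := by simpa using h
      exact ⟨0, by simp, by omega, by simp⟩
    · obtain ⟨k, hk, rfl, hc⟩ := ih _ _ h
      exact ⟨k + 1, by simpa using hk, by omega, by simpa using hc⟩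
    · obtain ⟨k, hk, rfl, hc⟩ := ih _ _ h
      exact ⟨k + 1, by simpa using hk, by omega, by simpa using hc⟩

theorem pv_join_nil_flatten (xss : List (List Char)) :
    PySem.Chars.join [] xss = xss.flatten := by
  induction xss with
  | nil => simp [PySem.Chars.join_nil]
  | cons p rest ih =>
    cases rest with
    | nil => simp [PySem.Chars.join_singleton]
    | cons q r => simp [PySem.Chars.join_cons_cons, ih]

-- main invariant: A's loop from index i with count ∈ {0,1} equals the finder on the suffix
theorem pv_main (cs : List Char) (i : Nat) (seen : Bool) (hi : i ≤ cs.length) :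
    pvA_go (cs.map (fun c => [c])) (cond seen 1 0) i =
      (match pvFind (cs.drop i) (i : Int) seen with
       | none => cs.map (fun c => [c])
       | some (j, c) => (cs.map (fun c => [c])).set j.toNat [c, c]) := by
  by_cases h : i < cs.length
  · rw [List.drop_eq_getElem_cons h]
    rw [pvA_go]
    simp only [List.length_map, h, dif_pos, List.getElem_map, pvFind]
    by_cases hc : PySem.Chars.isIn [cs[i]] pvConsonants
    · simp only [hc, if_pos]
      cases seen with
      | true => simp
      | false =>
        simp only [cond, show (0:Nat) + 1 ≠ 2 by omega, if_false]
        have := pv_main cs (i + 1) true (by omega)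
        simpa using this
    · simp only [hc, if_neg, Bool.false_eq_true, not_false_eq_true]
      have := pv_main cs (i + 1) seen (by omega)
      simpa using this
  · have hl : i = cs.length := by omega
    rw [pvA_go]
    simp [hl, pvFind]
termination_by cs.length - i

theorem pv_flatten_singletons (l : List Char) : (l.map (fun c => [c])).flatten = l := by
  rw [← pv_join_nil_flatten, PySem.Chars.join_nil_singletons]

-- ===== VERDICT =====
theorem double_letter_spec : Claim_equal_double_letter := by
  intro word _
  unfold Spec_double_letter double_letter double_letter_alt
  have h := pv_main word.toList 0 false (by omega)
  simp only [List.drop_zero, Bool.cond_false, Int.natCast_zero] at h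
  rw [h]
  rw [pvFind_posP]
  cases hp : (pvPosP word.toList 0)[1]? with
  | none =>
    have hlen : (pvPosP word.toList 0).length ≤ 1 := by
      by_contra hcon
      exact absurd hp (by simp; omega)
    simp only []
    have hmatch : (((PySem.List.enumerate word.toList 0).filter
        (fun p => PySem.Chars.isIn [p.2] pvConsonants)).map Prod.fst) = (pvPosP word.toList 0).map Prod.fst := rfl
    cases hpp : pvPosP word.toList 0 with
    | nil => simp [hmatch, hpp, PySem.Chars.join_nil_singletons]
    | cons x rest =>
      cases rest with
      | nil => simp [hmatch, hpp, PySem.Chars.join_nil_singletons]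
      | cons y r => rw [hpp] at hlen; simp at hlen
  | some p =>
    obtain ⟨j, c⟩ := p
    obtain ⟨k, hk, hj, hc⟩ := pvFind_spec word.toList 0 false j c (by rw [pvFind_posP]; exact hp)
    have hj0 : j = (k : Int) := by omega
    subst hj0
    -- B's match: positions has a second element j
    obtain ⟨x0, rest, hpp⟩ : ∃ x0 rest, pvPosP word.toList 0 = x0 :: ((k : Int), c) :: rest := by
      cases hpp : pvPosP word.toList 0 with
      | nil => rw [hpp] at hp; simp at hp
      | cons x rest =>
        cases rest with
        | nil => rw [hpp] at hp; simp at hp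
        | cons y r =>
          rw [hpp] at hp; simp at hp
          exact ⟨x, r, by rw [hp]⟩
    have hmatch : (((PySem.List.enumerate word.toList 0).filter
        (fun p => PySem.Chars.isIn [p.2] pvConsonants)).map Prod.fst) = (pvPosP word.toList 0).map Prod.fst := rfl
    rw [hmatch, hpp]
    simp only [List.map_cons]
    have hget : PySem.Chars.pyGet? word.toList (k : Int) = some c := by
      rw [show PySem.Chars.pyGet? word.toList (k : Int) = word.toList[k]? from PySem.List.pyGet?_natCast _ _]
      exact hc
    rw [hget]
    simp only [Bool.cond_false, List.getElem?_cons_succ, List.getElem?_cons_zero,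
      Int.toNat_natCast]
    rw [pv_join_nil_flatten]
    rw [List.set_eq_take_append_cons_drop]
    simp only [List.length_map, hk, if_pos]
    rw [← List.map_take, ← List.map_drop]
    rw [PySem.Chars.slice_eq_listSlice, PySem.Chars.slice_eq_listSlice]
    rw [PySem.List.slice_to_natCast]
    rw [show ((k : Int) + 1) = ((k + 1 : Nat) : Int) by push_cast; ring]
    rw [PySem.List.slice_from_natCast]
    congr 1
    rw [List.flatten_append, pv_flatten_singletons, List.flatten_cons,
        pv_flatten_singletons, List.append_assoc]
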